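-- pv_equiv track=rewrite | github.com/kimdakyeom/coding_test | 프로그래머스/lv2/60057. 문자열 압축/문자열 압축.py | solution
-- ===== SOURCE A (Python) =====
-- def solution(s):
--     answer = len(s)
--     for i in range(1, len(s) // 2 + 1):
--         tmp, idx = "", 0
--         while idx < len(s):
--             n = 1
--             word = s[idx:idx+i]
--             while word == s[idx+i:idx+i+i]:
--                 idx, n = idx + i, n + 1
--             if n != 1:
--                 tmp += (str(n) + word)
--             else:
--                 tmp +=  word
--             idx += i
--         if len(tmp) < answer:
--             answer = len(tmp)
--     return answer
-- ===== SOURCE B (Python) =====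
-- def solution(s):
--     n = len(s)
--     best = n
--     for i in range(1, n // 2 + 1):
--         # split s into chunks of size i (last one may be short)
--         chunks = []
--         t = s
--         while t:
--             chunks.append(t[:i])
--             t = t[i:]
--         # one pass over adjacent chunk pairs, counting run lengths arithmetically
--         total, run = 0, 1
--         for prev, cur in zip(chunks, chunks[1:]):
--             if cur == prev:
--                 run += 1
--             else:
--                 total += (len(str(run)) if run > 1 else 0) + len(prev)
--                 run = 1
--         if chunks:
--             total += (len(str(run)) if run > 1 else 0) + len(chunks[-1])
--         best = min(best, total)
--     return best
-- ===== Notes on version B (the rewrite author's own statement) =====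
-- stated objective: simpler
-- what changed: Replaces A's nested whiles with manual index jumps, slice re-comparisons and a built-up compressed string whose length is measured, by splitting the string into a chunk list once and making a single adjacent-pair pass that counts run lengths and sums the compressed size arithmetically.
import Mathlib
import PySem

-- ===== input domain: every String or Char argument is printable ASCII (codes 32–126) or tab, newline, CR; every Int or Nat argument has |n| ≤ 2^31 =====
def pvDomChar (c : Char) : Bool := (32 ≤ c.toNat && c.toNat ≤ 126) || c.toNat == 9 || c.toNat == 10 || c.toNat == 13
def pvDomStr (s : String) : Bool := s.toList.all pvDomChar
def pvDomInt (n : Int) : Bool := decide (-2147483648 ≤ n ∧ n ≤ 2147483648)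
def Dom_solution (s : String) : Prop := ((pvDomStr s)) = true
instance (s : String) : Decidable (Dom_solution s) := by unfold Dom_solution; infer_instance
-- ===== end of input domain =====

-- B replaces A's nested whiles + built-up compressed string by one chunk split and a single
-- adjacent-pair pass that sums the compressed length arithmetically (objective: simpler).
-- The 'fuel' arguments below (and the 'word ≠ []' / '0 < i' conjuncts inside the guards) only
-- make the while-loops structurally recursive and total; every call supplies enough fuel, and
-- Python never reaches the guards with an empty word or i = 0, so behaviour is unchanged.

-- ===== PORT A =====
-- inner 'while word == s[idx+i:idx+i+i]: idx, n = idx + i, n + 1'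
def aRun (l : List Char) (i : Nat) : Nat → Nat → Int → List Char → Nat × Int
  | 0, idx, n, _ => (idx, n)
  | fuel + 1, idx, n, word =>
    if word ≠ [] ∧ word = PySem.List.slice l (some ((idx : Int) + (i : Int))) (some ((idx : Int) + (i : Int) + (i : Int))) then
      aRun l i fuel (idx + i) (n + 1) word
    else (idx, n)

-- outer 'while idx < len(s): …' building tmp
def aOuter (l : List Char) (i : Nat) : Nat → Nat → List Char → List Char
  | 0, _, tmp => tmp
  | fuel + 1, idx, tmp =>
    if idx < l.length ∧ 0 < i then
      let word := PySem.List.slice l (some (idx : Int)) (some ((idx : Int) + (i : Int)))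
      let p := aRun l i l.length idx 1 word
      let tmp' := if p.2 ≠ 1 then tmp ++ (PySem.Int.toChars p.2 ++ word) else tmp ++ word
      aOuter l i fuel (p.1 + i) tmp'
    else tmp

def solution (s : String) : Int :=
  let l := s.toList
  (PySem.List.pyRange 1 (PySem.Int.floordiv (l.length : Int) 2 + 1)).foldl
    (fun answer i =>
      let tmp := aOuter l i.toNat (l.length + 1) 0 []
      if ((tmp.length : Int)) < answer then (tmp.length : Int) else answer)
    ((l.length : Int))

-- ===== PORT B =====
-- 'while t: chunks.append(t[:i]); t = t[i:]'
def bChunks : Nat → List Char → Int → List (List Char)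
  | 0, _, _ => []
  | fuel + 1, l, i =>
    if l ≠ [] ∧ 0 < i then
      PySem.List.slice l none (some i) :: bChunks fuel (PySem.List.slice l (some i) none) i
    else []

-- loop body of 'for prev, cur in zip(chunks, chunks[1:])'
def bStep (st : Int × Int) (pc : List Char × List Char) : Int × Int :=
  if pc.2 = pc.1 then (st.1, st.2 + 1)
  else (st.1 + (if 1 < st.2 then ((PySem.Int.toChars st.2).length : Int) else 0) + (pc.1.length : Int), 1)

def solution_alt (s : String) : Int :=
  let l := s.toList
  (PySem.List.pyRange 1 (PySem.Int.floordiv (l.length : Int) 2 + 1)).foldl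
    (fun best i =>
      let chunks := bChunks l.length l i
      let p := (chunks.zip (PySem.List.slice chunks (some 1) none)).foldl bStep (0, 1)
      let total :=
        if chunks ≠ [] then
          p.1 + (if 1 < p.2 then ((PySem.Int.toChars p.2).length : Int) else 0)
            + ((PySem.List.pyGetD chunks (-1) []).length : Int)
        else p.1
      min best total)
    ((l.length : Int))

-- ===== PRECONDITION & SPEC =====
def Spec_solution (s : String) (out : Int) : Prop := out = solution_alt s
instance (s : String) (out : Int) : Decidable (Spec_solution s out) := by unfold Spec_solution; infer_instance

-- ===== CLAIM (what is proved, stated in full; the proofs are below) =====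
def Claim_equal_solution : Prop := ∀ (s : String), Dom_solution s → Spec_solution s (solution s)

-- ===== LEMMAS AND PROOFS =====

-- length contributed by one run of n equal chunks whose text is w
def clen (n : Int) (w : List Char) : Int :=
  (if 1 < n then ((PySem.Int.toChars n).length : Int) else 0) + (w.length : Int)

-- compressed length of the remaining chunks, given current chunk w seen n times
def rleGo : List (List Char) → List Char → Int → Int
  | [], w, n => clen n w
  | c :: cs, w, n => if c = w then rleGo cs w (n + 1) else clen n w + rleGo cs c 1

theorem bChunks_nil (f : Nat) (i : Int) : bChunks f [] i = [] := by
  cases f <;> simp [bChunks]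

theorem bChunks_fuel : ∀ (f g : Nat) (l : List Char) (i : Int),
    l.length ≤ f → l.length ≤ g → bChunks f l i = bChunks g l i := by
  intro f
  induction f with
  | zero =>
    intro g l i hf _
    have : l = [] := List.length_eq_zero_iff.mp (by omega)
    subst this
    rw [bChunks_nil, bChunks_nil]
  | succ f ih =>
    intro g l i hf hg
    by_cases hl : l = []
    · subst hl; rw [bChunks_nil, bChunks_nil]
    · have hlen : 0 < l.length := List.length_pos_iff.mpr hl
      obtain ⟨g', rfl⟩ : ∃ g', g = g' + 1 := ⟨g - 1, by omega⟩
      by_cases hi : (0 : Int) < i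
      · simp only [bChunks, if_pos (And.intro hl hi)]
        rw [PySem.List.slice_from l hi.le]
        have hd : (l.drop i.toNat).length ≤ f := by
          simp only [List.length_drop]; omega
        have hd' : (l.drop i.toNat).length ≤ g' := by
          simp only [List.length_drop]; omega
        rw [ih g' (l.drop i.toNat) i hd hd']
      · have hno : ¬(l ≠ [] ∧ 0 < i) := fun hc => hi hc.2
        simp only [bChunks, if_neg hno]

theorem bChunks_cons (l : List Char) (i : Nat) (hl : l ≠ []) (hi : 0 < i) :
    bChunks l.length l (i : Int) = l.take i :: bChunks (l.drop i).length (l.drop i) (i : Int) := by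
  have hlen : 0 < l.length := List.length_pos_iff.mpr hl
  have h0 : (0 : Int) < (i : Int) := by exact_mod_cast hi
  obtain ⟨m, hm⟩ : ∃ m, l.length = m + 1 := ⟨l.length - 1, by omega⟩
  rw [hm]
  simp only [bChunks, if_pos (And.intro hl h0)]
  rw [PySem.List.slice_from l h0.le]
  have ht : PySem.List.slice l none (some ((i : Nat) : Int)) = l.take i := by
    simp [PySem.List.slice_to_natCast]
  rw [ht]
  have hit : ((i : Nat) : Int).toNat = i := by simp
  rw [hit]
  have hd : (l.drop i).length ≤ m := by
    simp only [List.length_drop]; omega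
  rw [bChunks_fuel m (l.drop i).length (l.drop i) ((i : Nat) : Int) hd le_rfl]

theorem zip_tail_cons (w c : List Char) (cs : List (List Char)) :
    (w :: c :: cs).zip (c :: cs) = (w, c) :: (c :: cs).zip cs := by simp

-- B's pass + final flush computes rleGo
theorem b_pass (cs : List (List Char)) : ∀ (w : List Char) (t r : Int),
    (((w :: cs).zip cs).foldl bStep (t, r)).1
      + (if 1 < (((w :: cs).zip cs).foldl bStep (t, r)).2 then
          ((PySem.Int.toChars (((w :: cs).zip cs).foldl bStep (t, r)).2).length : Int) else 0)
      + (((w :: cs).getLastD []).length : Int)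
      = t + rleGo cs w r := by
  induction cs with
  | nil =>
    intro w t r
    have hg : ([w] : List (List Char)).getLastD [] = w := rfl
    simp only [List.zip_nil_right, List.foldl_nil, rleGo, clen, hg]
    ring
  | cons c cs ih =>
    intro w t r
    rw [zip_tail_cons, List.foldl_cons]
    by_cases hcw : c = w
    · subst hcw
      have hb : bStep (t, r) (c, c) = (t, r + 1) := by simp [bStep]
      rw [hb]
      have hg : (c :: c :: cs).getLastD [] = (c :: cs).getLastD [] := rfl
      rw [hg, ih c t (r + 1)]
      simp [rleGo]
    · have hb : bStep (t, r) (w, c)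
          = (t + (if 1 < r then ((PySem.Int.toChars r).length : Int) else 0) + (w.length : Int), 1) := by
        simp [bStep, hcw]
      rw [hb]
      have hg : (w :: c :: cs).getLastD [] = (c :: cs).getLastD [] := rfl
      rw [hg, ih c (t + (if 1 < r then ((PySem.Int.toChars r).length : Int) else 0) + (w.length : Int)) 1]
      rw [rleGo, if_neg hcw]
      unfold clen
      ring

-- A's word at idx is the chunk (l.drop idx).take i
theorem slice_chunk (l : List Char) (idx i : Nat) :
    PySem.List.slice l (some (idx : Int)) (some ((idx : Int) + (i : Int))) = (l.drop idx).take i := by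
  have := PySem.List.slice_natCast_add l idx i
  push_cast at this ⊢
  exact this

theorem slice_chunk' (l : List Char) (idx i : Nat) :
    PySem.List.slice l (some ((idx : Int) + (i : Int))) (some ((idx : Int) + (i : Int) + (i : Int)))
      = (l.drop (idx + i)).take i := by
  have := slice_chunk l (idx + i) i
  push_cast at this
  exact this

theorem encA_len (n : Int) (w tmp : List Char) (hn : 1 ≤ n) :
    (((if n ≠ 1 then tmp ++ (PySem.Int.toChars n ++ w) else tmp ++ w)).length : Int)
      = (tmp.length : Int) + clen n w := by
  by_cases h : n = 1
  · simp [h, clen]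
  · have h1 : 1 < n := lt_of_le_of_ne hn (fun he => h he.symm)
    simp only [if_pos h, clen, if_pos h1, List.length_append]
    push_cast
    ring

theorem chunk_ne_nil (l : List Char) (idx i : Nat) (hidx : idx < l.length) (hi : 0 < i) :
    (l.drop idx).take i ≠ [] := by
  apply List.ne_nil_of_length_pos
  simp only [List.length_take, List.length_drop]
  omega

-- the heart: A's run counting + continuation equals rleGo on the chunk list
theorem a_main (k : Nat) : ∀ (l : List Char) (i idx : Nat) (n : Int) (tmp : List Char) (f g : Nat),
    l.length - idx ≤ k → 0 < i → idx < l.length → 1 ≤ n →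
    l.length - idx ≤ f → l.length - idx ≤ g →
    (((aOuter l i g ((aRun l i f idx n ((l.drop idx).take i)).1 + i)
        (if (aRun l i f idx n ((l.drop idx).take i)).2 ≠ 1 then
          tmp ++ (PySem.Int.toChars (aRun l i f idx n ((l.drop idx).take i)).2 ++ (l.drop idx).take i)
        else tmp ++ (l.drop idx).take i)).length : Int))
      = (tmp.length : Int)
        + rleGo (bChunks (l.drop (idx + i)).length (l.drop (idx + i)) (i : Int)) ((l.drop idx).take i) n := by
  induction k with
  | zero =>
    intro l i idx n tmp f g hk hi hidx hn hf hg
    omega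
  | succ k ih =>
    intro l i idx n tmp f g hk hi hidx hn hf hg
    have hw : (l.drop idx).take i ≠ [] := chunk_ne_nil l idx i hidx hi
    obtain ⟨f', rfl⟩ : ∃ f', f = f' + 1 := ⟨f - 1, by omega⟩
    obtain ⟨g', rfl⟩ : ∃ g', g = g' + 1 := ⟨g - 1, by omega⟩
    by_cases hge : l.length ≤ idx + i
    · -- past the end: the run stops, the remaining chunk list is empty
      have hdrop : l.drop (idx + i) = [] := by
        apply List.drop_eq_nil_iff.mpr; omega
      have hslice : PySem.List.slice l (some ((idx : Int) + (i : Int))) (some ((idx : Int) + (i : Int) + (i : Int))) = [] := by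
        rw [slice_chunk', hdrop]; simp
      have hrun : aRun l i (f' + 1) idx n ((l.drop idx).take i) = (idx, n) := by
        simp only [aRun]
        rw [if_neg]
        intro hcon
        exact hw (hcon.2.trans hslice)
      rw [hrun]
      have houter : ∀ t : List Char, aOuter l i (g' + 1) (idx + i) t = t := by
        intro t; simp only [aOuter]; rw [if_neg]; omega
      rw [houter, hdrop, bChunks_nil]
      simp only [rleGo]
      exact encA_len n ((l.drop idx).take i) tmp hn
    · rw [not_le] at hge
      set c := (l.drop (idx + i)).take i with hc
      have hcn : c ≠ [] := chunk_ne_nil l (idx + i) i hge hi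
      have hslice : PySem.List.slice l (some ((idx : Int) + (i : Int))) (some ((idx : Int) + (i : Int) + (i : Int))) = c :=
        slice_chunk' l idx i
      have hdd : (l.drop (idx + i)).drop i = l.drop (idx + i + i) := by
        rw [List.drop_drop]
      have hdne : l.drop (idx + i) ≠ [] := by
        apply List.ne_nil_of_length_pos
        simp only [List.length_drop]; omega
      have hbc : bChunks (l.drop (idx + i)).length (l.drop (idx + i)) (i : Int)
          = c :: bChunks (l.drop (idx + i + i)).length (l.drop (idx + i + i)) (i : Int) := by
        rw [bChunks_cons (l.drop (idx + i)) i hdne hi, hdd]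
      by_cases hwc : c = (l.drop idx).take i
      · -- run continues
        have hrun : aRun l i (f' + 1) idx n ((l.drop idx).take i)
            = aRun l i f' (idx + i) (n + 1) ((l.drop idx).take i) := by
          simp only [aRun]
          rw [if_pos ⟨hw, by rw [hslice, hwc]⟩]
        have hwc' : (l.drop (idx + i)).take i = (l.drop idx).take i := hwc
        have hih := ih l i (idx + i) (n + 1) tmp f' (g' + 1) (by omega) hi hge (by omega)
          (by omega) (by omega)
        rw [hwc'] at hih
        rw [hrun, hbc]
        rw [show rleGo (c :: bChunks (l.drop (idx + i + i)).length (l.drop (idx + i + i)) (i : Int)) ((l.drop idx).take i) n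
              = rleGo (bChunks (l.drop (idx + i + i)).length (l.drop (idx + i + i)) (i : Int)) ((l.drop idx).take i) (n + 1) from by
          rw [rleGo, if_pos hwc]]
        exact hih
      · -- run ends here; a new run starts at idx + i
        have hrun : aRun l i (f' + 1) idx n ((l.drop idx).take i) = (idx, n) := by
          simp only [aRun]
          rw [if_neg]
          intro hcon
          exact hwc ((hcon.2.trans hslice).symm)
        rw [hrun]
        set tmp2 := (if n ≠ 1 then tmp ++ (PySem.Int.toChars n ++ (l.drop idx).take i) else tmp ++ (l.drop idx).take i) with htmp2
        have houter : aOuter l i (g' + 1) (idx + i) tmp2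
            = aOuter l i g' ((aRun l i l.length (idx + i) 1 c).1 + i)
                (if (aRun l i l.length (idx + i) 1 c).2 ≠ 1 then
                  tmp2 ++ (PySem.Int.toChars (aRun l i l.length (idx + i) 1 c).2 ++ c)
                else tmp2 ++ c) := by
          simp only [aOuter]
          rw [if_pos ⟨hge, hi⟩]
          rw [slice_chunk l (idx + i) i, ← hc]
        rw [houter]
        have hih := ih l i (idx + i) 1 tmp2 l.length g' (by omega) hi hge le_rfl (by omega) (by omega)
        rw [← hc] at hih
        rw [hih, hbc]
        rw [show rleGo (c :: bChunks (l.drop (idx + i + i)).length (l.drop (idx + i + i)) (i : Int)) ((l.drop idx).take i) n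
              = clen n ((l.drop idx).take i) + rleGo (bChunks (l.drop (idx + i + i)).length (l.drop (idx + i + i)) (i : Int)) c 1 from by
          rw [rleGo, if_neg hwc]]
        have henc := encA_len n ((l.drop idx).take i) tmp hn
        rw [← htmp2] at henc
        rw [henc]
        ring

theorem a_outer_eq (l : List Char) (i : Nat) (hi : 0 < i) (idx : Nat) (tmp : List Char) (g : Nat)
    (hidx : idx < l.length) (hg : l.length - idx < g) :
    ((aOuter l i g idx tmp).length : Int)
      = (tmp.length : Int)
        + rleGo (bChunks (l.drop (idx + i)).length (l.drop (idx + i)) (i : Int)) ((l.drop idx).take i) 1 := by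
  obtain ⟨g', rfl⟩ : ∃ g', g = g' + 1 := ⟨g - 1, by omega⟩
  simp only [aOuter]
  rw [if_pos ⟨hidx, hi⟩]
  rw [slice_chunk]
  exact a_main (l.length - idx) l i idx 1 tmp l.length g' le_rfl hi hidx le_rfl (by omega) (by omega)

theorem pyGetD_neg_one (cs : List (List Char)) (h : cs ≠ []) :
    PySem.List.pyGetD cs (-1) [] = cs.getLastD [] := by
  have hl : 0 < cs.length := List.length_pos_iff.mpr h
  have h1 : PySem.List.pyIdx? cs.length (-1) = some (cs.length - 1) := by
    unfold PySem.List.pyIdx?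
    rw [if_neg (by omega), if_pos (by omega)]
    norm_num
  simp [PySem.List.pyGetD, PySem.List.pyGet?, h1, List.getLastD_eq_getLast?,
    List.getLast?_eq_getElem?]

-- per-chunk-size agreement
theorem per_i (l : List Char) (i : Nat) (hi : 0 < i) :
    ((aOuter l i (l.length + 1) 0 []).length : Int)
      = (let chunks := bChunks l.length l (i : Int)
         let p := (chunks.zip (PySem.List.slice chunks (some 1) none)).foldl bStep (0, 1)
         if chunks ≠ [] then
           p.1 + (if 1 < p.2 then ((PySem.Int.toChars p.2).length : Int) else 0)
             + ((PySem.List.pyGetD chunks (-1) []).length : Int)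
         else p.1) := by
  by_cases hl : l = []
  · subst hl
    simp [aOuter, bChunks]
  · have h0 : 0 < l.length := List.length_pos_iff.mpr hl
    have hbc : bChunks l.length l (i : Int) = l.take i :: bChunks (l.drop i).length (l.drop i) (i : Int) :=
      bChunks_cons l i hl hi
    have hlhs := a_outer_eq l i hi 0 [] (l.length + 1) h0 (by omega)
    simp only [List.drop_zero, Nat.zero_add] at hlhs
    simp only [hbc]
    set cs := bChunks (l.drop i).length (l.drop i) (i : Int) with hcs
    have htail : PySem.List.slice (l.take i :: cs) (some 1) none = cs := by
      rw [PySem.List.slice_from _ (by norm_num : (0:Int) ≤ 1)]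
      simp
    simp only [htail]
    rw [if_pos (by simp : (l.take i :: cs) ≠ [])]
    rw [pyGetD_neg_one _ (by simp)]
    rw [b_pass cs (l.take i) 0 1]
    rw [hlhs]
    simp

-- ===== VERDICT (by name: the statement is the Claim_ definition above) =====
theorem solution_spec : Claim_equal_solution := by
  unfold Claim_equal_solution Spec_solution
  intro s _
  unfold solution solution_alt
  dsimp only
  apply PySem.List.foldl_congr_mem
  intro acc x hx
  have hx1 : (1 : Int) ≤ x := (PySem.List.mem_pyRange_one.mp hx).1
  have hxt : ((x.toNat : Nat) : Int) = x := Int.toNat_of_nonneg (by omega)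
  have hipos : 0 < x.toNat := by omega
  have hpi := per_i s.toList x.toNat hipos
  rw [hxt] at hpi
  dsimp only at hpi ⊢
  rw [hpi, min_def]
  split_ifs <;> omega
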